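-- pv_equiv track=rewrite | github.com/stur007/PKU_Courses | Introduction to Computation B/2024fall_problems/test0_4.py | solve
-- ===== SOURCE A (Python) =====
-- from collections import deque, defaultdict
--
-- def bfs(start, graph, visited, component):
--     queue = deque([start])
--     visited[start] = True
--     while queue:
--         node = queue.popleft()
--         component.append(node)
--         for neighbor in graph[node]:
--             if not visited[neighbor]:
--                 visited[neighbor] = True
--                 queue.append(neighbor)
--
-- def solve(N, D, heights):
--     graph = defaultdict(list)
--
--     # 建立图的邻接表
--     for i in range(N - 1):
--         if abs(heights[i] - heights[i + 1]) <= D: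
--             graph[i].append(i + 1)
--             graph[i + 1].append(i)
--
--     visited = [False] * N
--     components = []
--
--     # 找到所有连通分量
--     for i in range(N):
--         if not visited[i]:
--             component = []
--             bfs(i, graph, visited, component)
--             components.append(component)
--
--     # 对每个连通分量进行排序
--     result = [0] * N
--     for component in components:
--         sorted_heights = sorted([heights[i] for i in component])
--         for idx, node in enumerate(sorted(component)):
--             result[node] = sorted_heights[idx]
--
--     return result
-- ===== SOURCE B (Python) =====
-- def solve(N, D, heights):
--     # One linear pass: partition indices 0..N-1 into maximal contiguous runs
--     # (adjacent diff <= D), sort each run's heights, and concatenate.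
--     res = []
--     lo = 0
--     for i in range(N):
--         if i + 1 == N or abs(heights[i] - heights[i + 1]) > D:
--             res.extend(sorted(heights[lo:i + 1]))
--             lo = i + 1
--     return res
-- ===== Notes on version B (the rewrite author's own statement) =====
-- stated objective: simpler
-- what changed: Replaced the adjacency-list graph, visited array and BFS component search by a single linear scan that closes a maximal contiguous run at each boundary (adjacent diff > D) and appends the sorted run slice.
import Mathlib
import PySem

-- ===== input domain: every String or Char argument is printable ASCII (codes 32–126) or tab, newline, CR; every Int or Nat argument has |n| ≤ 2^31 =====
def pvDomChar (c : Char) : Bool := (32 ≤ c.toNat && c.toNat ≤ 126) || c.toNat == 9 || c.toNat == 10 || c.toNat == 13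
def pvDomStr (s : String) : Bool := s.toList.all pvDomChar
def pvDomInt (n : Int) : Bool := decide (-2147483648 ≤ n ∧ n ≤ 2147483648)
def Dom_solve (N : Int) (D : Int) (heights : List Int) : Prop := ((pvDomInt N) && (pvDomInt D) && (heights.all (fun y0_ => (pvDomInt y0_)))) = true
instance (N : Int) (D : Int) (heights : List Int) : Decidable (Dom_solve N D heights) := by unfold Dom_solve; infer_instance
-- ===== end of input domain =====

-- B replaces the graph / visited array / BFS of A by one linear scan that closes each
-- maximal contiguous run (adjacent diff ≤ D) and appends the sorted run slice: simpler.

-- ===== PORT A =====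
-- List indices reached by A are always nonnegative and in range under Pre_solve, so
-- visited[j] reads/writes are ported with List.getD/PySem.List.pySetD on .toNat (exact there).
def bfsLoopA (graph : PySem.Dict Int (List Int)) : Nat → List Int → List Bool → List Int → List Bool × List Int
  | 0, _, visited, component => (visited, component)          -- fuel guard only (never hit: each node is enqueued at most once)
  | _ + 1, [], visited, component => (visited, component)
  | fuel + 1, node :: rest, visited, component =>
      let st := (graph.getD node []).foldl
        (fun (st : List Int × List Bool) neighbor =>
          if st.2.getD neighbor.toNat true = false then
            (st.1 ++ [neighbor], PySem.List.pySetD st.2 neighbor true)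
          else st) (rest, visited)
      bfsLoopA graph fuel st.1 st.2 (component ++ [node])

def bfsA (start : Int) (graph : PySem.Dict Int (List Int)) (visited : List Bool) (fuel : Nat) : List Bool × List Int :=
  bfsLoopA graph fuel [start] (PySem.List.pySetD visited start true) []

def gstepA (D : Int) (heights : List Int) (g : PySem.Dict Int (List Int)) (i : Int) : PySem.Dict Int (List Int) :=
  if |PySem.List.pyGetD heights i 0 - PySem.List.pyGetD heights (i + 1) 0| ≤ D then
    (g.modify i [] (fun l => l ++ [i + 1])).modify (i + 1) [] (fun l => l ++ [i])
  else g

def compStepA (graph : PySem.Dict Int (List Int)) (fuel : Nat)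
    (st : List Bool × List (List Int)) (i : Int) : List Bool × List (List Int) :=
  if st.1.getD i.toNat true = false then
    let r := bfsA i graph st.1 fuel
    (r.1, st.2 ++ [r.2])
  else st

def writeRunA (heights : List Int) (result : List Int) (component : List Int) : List Int :=
  let sortedHeights := PySem.List.sorted (component.map (fun i => PySem.List.pyGetD heights i 0)) (fun x => x) false
  (PySem.List.enumerate (PySem.List.sorted component (fun x => x) false) 0).foldl
    (fun res p => PySem.List.pySetD res p.2 (PySem.List.pyGetD sortedHeights p.1 0)) result

def solve (N : Int) (D : Int) (heights : List Int) : List Int :=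
  let graph := (PySem.List.pyRange 0 (N - 1) 1).foldl (gstepA D heights) PySem.Dict.empty
  let st := (PySem.List.pyRange 0 N 1).foldl (compStepA graph (N.toNat + 1)) (List.replicate N.toNat false, [])
  st.2.foldl (writeRunA heights) (List.replicate N.toNat (0 : Int))

-- ===== PORT B =====
def bStepB (N : Int) (D : Int) (heights : List Int) (st : List Int × Int) (i : Int) : List Int × Int :=
  if i + 1 = N ∨ D < |PySem.List.pyGetD heights i 0 - PySem.List.pyGetD heights (i + 1) 0| then
    (st.1 ++ PySem.List.sorted (PySem.List.slice heights (some st.2) (some (i + 1))) (fun x => x) false, i + 1)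
  else st

def solve_alt (N : Int) (D : Int) (heights : List Int) : List Int :=
  ((PySem.List.pyRange 0 N 1).foldl (bStepB N D heights) ([], 0)).1

-- ===== PRECONDITION & SPEC =====
-- Python A (and B) raises IndexError exactly when N > len(heights): excluded.
def Pre_solve (N : Int) (D : Int) (heights : List Int) : Prop := N ≤ (heights.length : Int)
instance (N : Int) (D : Int) (heights : List Int) : Decidable (Pre_solve N D heights) := by unfold Pre_solve; infer_instance
def pvWitness_solve : Int × Int × List Int := (5, 1, [3, 2, 9, 8, 7])

def Spec_solve (N : Int) (D : Int) (heights : List Int) (out : List Int) : Prop := out = solve_alt N D heights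
instance (N : Int) (D : Int) (heights : List Int) (out : List Int) : Decidable (Spec_solve N D heights out) := by unfold Spec_solve; infer_instance

-- ===== CLAIM (what is proved, stated in full; the proofs are below) =====
def Claim_equal_solve : Prop := ∀ (N : Int) (D : Int) (heights : List Int), Dom_solve N D heights → Pre_solve N D heights → Spec_solve N D heights (solve N D heights)

-- ===== LEMMAS AND PROOFS =====

-- value at index, and "adjacent pair i,i+1 is close" (both on Nat indices)
def hvF (heights : List Int) (i : Nat) : Int := heights.getD i 0
def condF (D : Int) (heights : List Int) (i : Nat) : Bool := decide (|hvF heights i - hvF heights (i + 1)| ≤ D)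

-- end of the maximal contiguous run starting at k (inside [0, n))
def runEnd (n : Nat) (c : Nat → Bool) (k : Nat) : Nat :=
  if h : k + 1 < n ∧ c k then runEnd n c (k + 1) else k
termination_by n - k
decreasing_by omega

lemma le_runEnd (n : Nat) (c : Nat → Bool) (k : Nat) : k ≤ runEnd n c k := by
  fun_induction runEnd with
  | case1 k h ih => omega
  | case2 k h => omega

lemma runEnd_lt (n : Nat) (c : Nat → Bool) (k : Nat) (hk : k < n) : runEnd n c k < n := by
  fun_induction runEnd with
  | case1 k h ih => exact ih h.1
  | case2 k h => omega

lemma runEnd_stop (n : Nat) (c : Nat → Bool) (k : Nat) :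
    ¬ (runEnd n c k + 1 < n ∧ c (runEnd n c k)) := by
  fun_induction runEnd with
  | case1 k h ih => exact ih
  | case2 k h => exact h

lemma runEnd_cond (n : Nat) (c : Nat → Bool) (k i : Nat) (h1 : k ≤ i) (h2 : i < runEnd n c k) :
    c i = true := by
  fun_induction runEnd with
  | case1 k h ih =>
      rcases Nat.eq_or_lt_of_le h1 with rfl | hlt
      · exact h.2
      · exact ih hlt h2
  | case2 k h => omega

lemma runEnd_eq (n : Nat) (c : Nat → Bool) (k : Nat) (h : k + 1 < n ∧ c k) :
    runEnd n c k = runEnd n c (k + 1) := by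
  rw [runEnd]; simp [h]

lemma runEnd_eq_self (n : Nat) (c : Nat → Bool) (k : Nat) (h : ¬ (k + 1 < n ∧ c k)) :
    runEnd n c k = k := by
  rw [runEnd]; simp [h]

-- visited array with exactly the first b cells true
def mkVis (n b : Nat) : List Bool := (List.range n).map (fun j => decide (j < b))

lemma getD_mkVis (n b j : Nat) (d : Bool) :
    (mkVis n b).getD j d = if j < n then decide (j < b) else d := by
  unfold mkVis
  rcases Nat.lt_or_ge j n with h | h
  · rw [List.getD_eq_getElem _ _ (by simpa using h)]
    simp [h]
  · rw [List.getD_eq_default _ _ (by simpa using h)]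
    simp [Nat.not_lt.mpr h]

lemma set_mkVis (n b : Nat) : (mkVis n b).set b true = mkVis n (b + 1) := by
  apply List.ext_getElem
  · simp [mkVis]
  · intro j h1 h2
    have hj : j < n := by simpa [mkVis] using h2
    simp only [mkVis, List.getElem_set, List.getElem_map, List.getElem_range]
    by_cases hb : b = j
    · simp [hb]
    · simp only [if_neg hb, decide_eq_decide]
      omega

lemma replicate_eq_mkVis (n : Nat) : List.replicate n false = mkVis n 0 := by
  apply List.ext_getElem <;> simp [mkVis]

-- B's sorted-runs specification
def segF (heights : List Int) (k e : Nat) : List Int := (heights.drop k).take (e + 1 - k)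

def bSpecF (D : Int) (heights : List Int) (n : Nat) (k : Nat) : List Int :=
  if h : k < n then
    PySem.List.sorted (segF heights k (runEnd n (condF D heights) k)) (fun x => x) false
      ++ bSpecF D heights n (runEnd n (condF D heights) k + 1)
  else []
termination_by n - k
decreasing_by have := le_runEnd n (condF D heights) k; omega

def compsSpec (n : Nat) (c : Nat → Bool) (k : Nat) : List (List Int) :=
  if h : k < n then
    PySem.List.pyRange (k : Int) ((runEnd n c k : Int) + 1) 1 :: compsSpec n c (runEnd n c k + 1)
  else []
termination_by n - k
decreasing_by have := le_runEnd n c k; omega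

-- L1: the adjacency dict built by A's first loop
lemma graph_getD (D : Int) (heights : List Int) (m : Int) (hm : 0 ≤ m) (k : Int) :
    ((PySem.List.pyRange 0 m 1).foldl (gstepA D heights) PySem.Dict.empty).getD k []
      = (if 1 ≤ k ∧ k - 1 < m ∧ |PySem.List.pyGetD heights (k - 1) 0 - PySem.List.pyGetD heights k 0| ≤ D then [k - 1] else [])
        ++ (if 0 ≤ k ∧ k < m ∧ |PySem.List.pyGetD heights k 0 - PySem.List.pyGetD heights (k + 1) 0| ≤ D then [k + 1] else []) := by
  induction m, hm using Int.le_induction generalizing k with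
  | base =>
      rw [PySem.List.pyRange_one_eq_nil (by omega)]
      rw [if_neg (by rintro ⟨h1, h2, -⟩; omega), if_neg (by rintro ⟨h1, h2, -⟩; omega)]
      simp [PySem.Dict.getD_empty]
  | succ m hm ih =>
      rw [PySem.List.pyRange_one_succ_right (by omega), List.foldl_append]
      simp only [List.foldl_cons, List.foldl_nil]
      simp only [gstepA]
      by_cases hc : |PySem.List.pyGetD heights m 0 - PySem.List.pyGetD heights (m + 1) 0| ≤ D
      · rw [if_pos hc]
        simp only [PySem.Dict.getD_modify]
        by_cases hk1 : k = m + 1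
        · subst hk1
          rw [if_pos rfl, if_neg (by omega), ih]
          rw [if_neg (by rintro ⟨-, h2, -⟩; omega), if_neg (by rintro ⟨-, h2, -⟩; omega)]
          rw [if_pos ⟨by omega, by omega, by simpa using hc⟩, if_neg (by rintro ⟨-, h2, -⟩; omega)]
          simp
        · rw [if_neg hk1]
          by_cases hk2 : k = m
          · subst hk2
            rw [if_pos rfl, ih]
            rw [if_neg (show ¬(0 ≤ k ∧ k < k ∧ |PySem.List.pyGetD heights k 0 - PySem.List.pyGetD heights (k + 1) 0| ≤ D) from by rintro ⟨-, h2, -⟩; omega)]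
            rw [if_pos (show 0 ≤ k ∧ k < k + 1 ∧ |PySem.List.pyGetD heights k 0 - PySem.List.pyGetD heights (k + 1) 0| ≤ D from ⟨hm, by omega, hc⟩)]
            by_cases hl : 1 ≤ k ∧ |PySem.List.pyGetD heights (k - 1) 0 - PySem.List.pyGetD heights k 0| ≤ D
            · rw [if_pos (show 1 ≤ k ∧ k - 1 < k ∧ |PySem.List.pyGetD heights (k - 1) 0 - PySem.List.pyGetD heights k 0| ≤ D from ⟨hl.1, by omega, hl.2⟩),
                  if_pos (show 1 ≤ k ∧ k - 1 < k + 1 ∧ |PySem.List.pyGetD heights (k - 1) 0 - PySem.List.pyGetD heights k 0| ≤ D from ⟨hl.1, by omega, hl.2⟩)]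
              simp
            · rw [if_neg (show ¬(1 ≤ k ∧ k - 1 < k ∧ |PySem.List.pyGetD heights (k - 1) 0 - PySem.List.pyGetD heights k 0| ≤ D) from by rintro ⟨h1, -, h3⟩; exact hl ⟨h1, h3⟩),
                  if_neg (show ¬(1 ≤ k ∧ k - 1 < k + 1 ∧ |PySem.List.pyGetD heights (k - 1) 0 - PySem.List.pyGetD heights k 0| ≤ D) from by rintro ⟨h1, -, h3⟩; exact hl ⟨h1, h3⟩)]
              simp
          · rw [if_neg hk2, ih]
            congr 1
            · by_cases hl : 1 ≤ k ∧ k - 1 < m ∧ |PySem.List.pyGetD heights (k - 1) 0 - PySem.List.pyGetD heights k 0| ≤ D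
              · rw [if_pos hl, if_pos ⟨hl.1, by omega, hl.2.2⟩]
              · rw [if_neg hl, if_neg (by rintro ⟨h1, h2, h3⟩; exact hl ⟨h1, by omega, h3⟩)]
            · by_cases hr : 0 ≤ k ∧ k < m ∧ |PySem.List.pyGetD heights k 0 - PySem.List.pyGetD heights (k + 1) 0| ≤ D
              · rw [if_pos hr, if_pos ⟨hr.1, by omega, hr.2.2⟩]
              · rw [if_neg hr, if_neg (by rintro ⟨h1, h2, h3⟩; exact hr ⟨h1, by omega, h3⟩)]
      · rw [if_neg hc, ih]
        congr 1
        · by_cases hl : 1 ≤ k ∧ k - 1 < m ∧ |PySem.List.pyGetD heights (k - 1) 0 - PySem.List.pyGetD heights k 0| ≤ D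
          · rw [if_pos hl, if_pos ⟨hl.1, by omega, hl.2.2⟩]
          · rw [if_neg hl]
            rw [if_neg (by
              rintro ⟨h1, h2, h3⟩
              by_cases hkm : k = m + 1
              · subst hkm; apply hc; simpa using h3
              · exact hl ⟨h1, by omega, h3⟩)]
        · by_cases hr : 0 ≤ k ∧ k < m ∧ |PySem.List.pyGetD heights k 0 - PySem.List.pyGetD heights (k + 1) 0| ≤ D
          · rw [if_pos hr, if_pos ⟨hr.1, by omega, hr.2.2⟩]
          · rw [if_neg hr]
            rw [if_neg (by
              rintro ⟨h1, h2, h3⟩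
              by_cases hkm : k = m
              · subst hkm; exact hc h3
              · exact hr ⟨h1, by omega, h3⟩)]

lemma bfsLoopA_nil (graph : PySem.Dict Int (List Int)) (fuel : Nat) (visited : List Bool) (comp : List Int) :
    bfsLoopA graph fuel [] visited comp = (visited, comp) := by
  cases fuel <;> rfl

lemma bfsLoopA_cons (graph : PySem.Dict Int (List Int)) (fuel : Nat) (node : Int) (rest : List Int)
    (visited : List Bool) (comp : List Int) :
    bfsLoopA graph (fuel + 1) (node :: rest) visited comp
      = bfsLoopA graph fuel
          (((graph.getD node []).foldl
            (fun (st : List Int × List Bool) neighbor =>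
              if st.2.getD neighbor.toNat true = false then
                (st.1 ++ [neighbor], PySem.List.pySetD st.2 neighbor true)
              else st) (rest, visited)).1)
          (((graph.getD node []).foldl
            (fun (st : List Int × List Bool) neighbor =>
              if st.2.getD neighbor.toNat true = false then
                (st.1 ++ [neighbor], PySem.List.pySetD st.2 neighbor true)
              else st) (rest, visited)).2)
          (comp ++ [node]) := rfl

-- L2: BFS from the start of a run walks exactly the run
lemma bfs_run (D : Int) (heights : List Int) (n : Nat) (hn : 1 ≤ n) :
    ∀ (fuel : Nat) (k : Nat) (comp : List Int), k < n → n - k ≤ fuel →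
    bfsLoopA ((PySem.List.pyRange 0 ((n : Int) - 1) 1).foldl (gstepA D heights) PySem.Dict.empty)
        fuel [(k : Int)] (mkVis n (k + 1)) comp
      = (mkVis n (runEnd n (condF D heights) k + 1),
         comp ++ PySem.List.pyRange (k : Int) ((runEnd n (condF D heights) k : Int) + 1) 1) := by
  intro fuel
  induction fuel with
  | zero => intro k comp hk hf; omega
  | succ fuel ih =>
      intro k comp hk hf
      rw [bfsLoopA_cons]
      rw [graph_getD D heights ((n : Int) - 1) (by omega) (k : Int), List.foldl_append]
      have hleft : (if 1 ≤ (k : Int) ∧ (k : Int) - 1 < (n : Int) - 1 ∧ |PySem.List.pyGetD heights ((k : Int) - 1) 0 - PySem.List.pyGetD heights (k : Int) 0| ≤ D then [(k : Int) - 1] else []).foldl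
          (fun (st : List Int × List Bool) neighbor =>
            if st.2.getD neighbor.toNat true = false then
              (st.1 ++ [neighbor], PySem.List.pySetD st.2 neighbor true)
            else st) ([], mkVis n (k + 1)) = ([], mkVis n (k + 1)) := by
        split_ifs with hc
        · have ht : ((k : Int) - 1).toNat = k - 1 := by omega
          simp only [List.foldl_cons, List.foldl_nil, ht, getD_mkVis]
          have : (if k - 1 < n then decide (k - 1 < k + 1) else true) = true := by
            split_ifs <;> simp
          rw [this]
          simp
        · simp
      rw [hleft]
      by_cases hr : k + 1 < n ∧ condF D heights k = true
      · have hcond : |PySem.List.pyGetD heights (k : Int) 0 - PySem.List.pyGetD heights ((k : Int) + 1) 0| ≤ D := by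
          have := hr.2
          unfold condF hvF at this
          rw [show ((k : Int) + 1) = ((k + 1 : Nat) : Int) by push_cast; ring]
          simp only [PySem.List.pyGetD_natCast]
          exact of_decide_eq_true this
        rw [if_pos ⟨by omega, by omega, hcond⟩]
        have ht : ((k : Int) + 1).toNat = k + 1 := by omega
        simp only [List.foldl_cons, List.foldl_nil, ht, getD_mkVis, if_pos hr.1]
        rw [show (decide (k + 1 < k + 1)) = false by simp]
        simp only [if_true, List.nil_append]
        have hset : PySem.List.pySetD (mkVis n (k + 1)) ((k : Int) + 1) true = mkVis n (k + 2) := by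
          rw [show ((k : Int) + 1) = ((k + 1 : Nat) : Int) by push_cast; ring, PySem.List.pySetD_natCast]
          exact set_mkVis n (k + 1)
        rw [hset, show ((k : Int) + 1) = ((k + 1 : Nat) : Int) by push_cast; ring]
        rw [ih (k + 1) (comp ++ [(k : Int)]) hr.1 (by omega)]
        rw [runEnd_eq n (condF D heights) k hr]
        have hke : (k : Int) < (runEnd n (condF D heights) (k + 1) : Int) + 1 := by
          have := le_runEnd n (condF D heights) (k + 1); omega
        rw [PySem.List.pyRange_one_cons hke]
        rw [show ((k : Int) + 1) = ((k + 1 : Nat) : Int) by push_cast; ring]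
        simp
      · have hre : runEnd n (condF D heights) k = k := runEnd_eq_self n (condF D heights) k (by
          rintro ⟨h1, h2⟩; exact hr ⟨h1, h2⟩)
        rw [if_neg (by
          rintro ⟨-, h2, h3⟩
          apply hr
          refine ⟨by omega, ?_⟩
          unfold condF hvF
          rw [show ((k : Int) + 1) = ((k + 1 : Nat) : Int) by push_cast; ring] at h3
          simp only [PySem.List.pyGetD_natCast] at h3
          simpa using h3)]
        simp only [List.foldl_nil]
        rw [bfsLoopA_nil, hre]
        rw [PySem.List.pyRange_one_singleton]

-- L3: the component-collection loop yields the runs in order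
lemma comps_loop (D : Int) (heights : List Int) (n : Nat) :
    ∀ (i b : Nat) (acc : List (List Int)), i ≤ b →
    ((PySem.List.pyRange (i : Int) (n : Int) 1).foldl
        (compStepA ((PySem.List.pyRange 0 ((n : Int) - 1) 1).foldl (gstepA D heights) PySem.Dict.empty) (n + 1))
        (mkVis n b, acc))
      = (mkVis n (max b n), acc ++ compsSpec n (condF D heights) b) := by
  intro i
  induction hd : n - i generalizing i with
  | zero =>
      intro b acc hib
      rw [PySem.List.pyRange_one_eq_nil (show (n : Int) ≤ (i : Int) by omega)]
      rw [compsSpec, dif_neg (by omega)]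
      have : max b n = b := by omega
      rw [this]
      simp
  | succ d ihd =>
      intro b acc hib
      have hin : i < n := by omega
      rw [PySem.List.pyRange_one_cons (show (i : Int) < (n : Int) by exact_mod_cast hin)]
      rw [List.foldl_cons]
      rcases Nat.eq_or_lt_of_le hib with rfl | hlt
      · -- i = b: start a BFS
        have hstep : compStepA ((PySem.List.pyRange 0 ((n : Int) - 1) 1).foldl (gstepA D heights) PySem.Dict.empty) (n + 1)
            (mkVis n i, acc) (i : Int)
            = (mkVis n (runEnd n (condF D heights) i + 1),
               acc ++ [PySem.List.pyRange (i : Int) ((runEnd n (condF D heights) i : Int) + 1) 1]) := by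
          unfold compStepA
          rw [show ((i : Int).toNat) = i by omega]
          rw [getD_mkVis]
          rw [if_pos (by simp [hin])]
          unfold bfsA
          rw [PySem.List.pySetD_natCast, set_mkVis]
          rw [bfs_run D heights n (by omega) (n + 1) i [] hin (by omega)]
          simp
        rw [hstep]
        rw [show ((i : Int) + 1) = ((i + 1 : Nat) : Int) by push_cast; ring]
        have hre := le_runEnd n (condF D heights) i
        rw [ihd (i + 1) (by omega) (runEnd n (condF D heights) i + 1) _ (by omega)]
        conv_rhs => rw [compsSpec]
        rw [dif_pos hin]
        have hmax : max (runEnd n (condF D heights) i + 1) n = max i n := by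
          have := runEnd_lt n (condF D heights) i hin; omega
        rw [hmax]
        simp [List.append_assoc]
      · -- i < b: already visited, skip
        have hstep : compStepA ((PySem.List.pyRange 0 ((n : Int) - 1) 1).foldl (gstepA D heights) PySem.Dict.empty) (n + 1)
            (mkVis n b, acc) (i : Int) = (mkVis n b, acc) := by
          unfold compStepA
          rw [show ((i : Int).toNat) = i by omega]
          rw [getD_mkVis, if_pos hin]
          rw [if_neg (by simp [hlt])]
        rw [hstep, show ((i : Int) + 1) = ((i + 1 : Nat) : Int) by push_cast; ring]
        exact ihd (i + 1) (by omega) b acc (by omega)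

-- L4: reading a run of indices gives the contiguous slice
lemma map_run_seg (heights : List Int) (a b : Nat) (hb : b ≤ heights.length) :
    (PySem.List.pyRange (a : Int) (b : Int) 1).map (fun i => PySem.List.pyGetD heights i 0)
      = (heights.drop a).take (b - a) := by
  induction hd : b - a generalizing a with
  | zero =>
      rw [PySem.List.pyRange_one_eq_nil (by exact_mod_cast Nat.le_of_sub_eq_zero hd)]
      simp
  | succ d ih =>
      have hab : a < b := by omega
      have ha : a < heights.length := by omega
      rw [PySem.List.pyRange_one_cons (by exact_mod_cast hab)]
      have : ((a : Int) + 1) = ((a + 1 : Nat) : Int) := by push_cast; ring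
      rw [this, List.map_cons, ih (a + 1) (by omega)]
      rw [PySem.List.pyGetD_natCast, List.getD_eq_getElem _ _ ha]
      rw [← List.getElem_cons_drop ha, List.take_succ_cons]

-- L6: writing vals into positions lo.. of res
lemma write_seg (vs : List Int) : ∀ (vals res : List Int) (s lo : Nat),
    vals.drop s = vs → lo + vs.length ≤ res.length →
    (PySem.List.enumerate (PySem.List.pyRange (lo : Int) ((lo : Int) + (vs.length : Int)) 1) (s : Int)).foldl
        (fun r p => PySem.List.pySetD r p.2 (PySem.List.pyGetD vals p.1 0)) res
      = res.take lo ++ vs ++ res.drop (lo + vs.length) := by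
  induction vs with
  | nil =>
      intro vals res s lo hdrop hlen
      rw [PySem.List.pyRange_one_eq_nil (by simp)]
      simp [PySem.List.enumerate]
  | cons v vs ih =>
      intro vals res s lo hdrop hlen
      have hlo : lo < res.length := by simp at hlen; omega
      have e1 : ((lo : Int) + 1) = ((lo + 1 : Nat) : Int) := by push_cast; ring
      have e2 : ((lo : Int) + ((v :: vs).length : Int)) = (((lo + 1 : Nat) : Int) + (vs.length : Int)) := by
        push_cast [List.length_cons]; ring
      have hcons : PySem.List.pyRange (lo : Int) ((lo : Int) + ((v :: vs).length : Int)) 1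
          = (lo : Int) :: PySem.List.pyRange ((lo + 1 : Nat) : Int) (((lo + 1 : Nat) : Int) + (vs.length : Int)) 1 := by
        rw [PySem.List.pyRange_one_cons (by omega), e1, e2]
      rw [hcons, PySem.List.enumerate_cons, List.foldl_cons]
      have hv : PySem.List.pyGetD vals (s : Int) 0 = v := by
        rw [PySem.List.pyGetD_natCast]
        have h0 := congrArg (fun l => l[0]?) hdrop
        simp only [List.getElem?_drop, List.getElem?_cons_zero, Nat.add_zero] at h0
        simp [List.getD, h0]
      have hstep : PySem.List.pySetD res ((lo : Nat) : Int) (PySem.List.pyGetD vals (s : Int) 0) = res.set lo v := by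
        rw [hv, PySem.List.pySetD_natCast]
      have hs1 : ((s : Int) + 1) = ((s + 1 : Nat) : Int) := by push_cast; ring
      rw [hstep, hs1, ih vals (res.set lo v) (s + 1) (lo + 1)
        (by rw [← List.drop_drop, hdrop]; rfl)
        (by simp at hlen ⊢; omega)]
      have htake : (res.take lo).length = lo := by simp; omega
      have hA : (res.set lo v).take (lo + 1) = res.take lo ++ [v] := by
        rw [List.set_eq_take_cons_drop _ hlo, List.take_append, htake, List.take_take]
        have h1 : min (lo + 1) lo = lo := by omega
        rw [h1]
        simp
      have hB : (res.set lo v).drop (lo + 1 + vs.length) = res.drop (lo + (vs.length + 1)) := by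
        rw [List.set_eq_take_cons_drop _ hlo, List.drop_append, htake,
            List.drop_eq_nil_of_le (by omega)]
        have h1 : lo + 1 + vs.length - lo = vs.length + 1 := by omega
        rw [h1]
        show List.drop (vs.length + 1) (v :: res.drop (lo + 1)) = _
        rw [List.drop_succ_cons, List.drop_drop]
        congr 1
        omega
      rw [hA, hB]
      simp [List.append_assoc]

-- L7: the final write loop produces the sorted runs
lemma write_runs (D : Int) (heights : List Int) (n : Nat) (hn : n ≤ heights.length) :
    ∀ (k : Nat) (res : List Int), res.length = n →
    (compsSpec n (condF D heights) k).foldl (writeRunA heights) res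
      = res.take k ++ bSpecF D heights n k := by
  suffices H : ∀ (d k : Nat) (res : List Int), n - k ≤ d → res.length = n →
      (compsSpec n (condF D heights) k).foldl (writeRunA heights) res
        = res.take k ++ bSpecF D heights n k by
    intro k res hres
    exact H n k res (by omega) hres
  intro d
  induction d with
  | zero =>
      intro k res hdk hres
      rw [compsSpec, dif_neg (by omega), bSpecF, dif_neg (by omega)]
      rw [List.foldl_nil, List.take_of_length_le (by omega), List.append_nil]
  | succ d ihd =>
      intro k res hdk hres
      by_cases hk : k < n
      · have hke := le_runEnd n (condF D heights) k
        have he := runEnd_lt n (condF D heights) k hk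
        set e := runEnd n (condF D heights) k with hedef
        rw [compsSpec, dif_pos hk, List.foldl_cons]
        rw [← hedef]
        have hmap : (PySem.List.pyRange (k : Int) ((e : Int) + 1) 1).map (fun i => PySem.List.pyGetD heights i 0)
            = segF heights k e := by
          rw [show ((e : Int) + 1) = ((e + 1 : Nat) : Int) by push_cast; ring]
          exact map_run_seg heights k (e + 1) (by omega)
        have hsc : PySem.List.sorted (PySem.List.pyRange (k : Int) ((e : Int) + 1) 1) (fun x => x) false
            = PySem.List.pyRange (k : Int) ((e : Int) + 1) 1 := by
          apply PySem.List.sorted_eq_self_of_pairwise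
          exact (PySem.List.pairwise_lt_pyRange_one _ _).imp le_of_lt
        have hvslen : (PySem.List.sorted (segF heights k e) (fun x => x) false).length = e + 1 - k := by
          rw [PySem.List.length_sorted]
          simp [segF]
          omega
        have hw : writeRunA heights res (PySem.List.pyRange (k : Int) ((e : Int) + 1) 1)
            = res.take k ++ PySem.List.sorted (segF heights k e) (fun x => x) false ++ res.drop (e + 1) := by
          unfold writeRunA
          rw [hmap, hsc]
          have hrange : PySem.List.pyRange (k : Int) ((e : Int) + 1) 1
              = PySem.List.pyRange (k : Int) ((k : Int) + ((PySem.List.sorted (segF heights k e) (fun x => x) false).length : Int)) 1 := by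
            rw [hvslen]
            congr 1
            omega
          rw [hrange]
          have hws := write_seg (PySem.List.sorted (segF heights k e) (fun x => x) false)
            (PySem.List.sorted (segF heights k e) (fun x => x) false) res 0 k rfl (by omega)
          simp only [Nat.cast_zero] at hws
          rw [hws, hvslen]
          congr 2
          omega
        rw [hw]
        have hlen' : (res.take k ++ PySem.List.sorted (segF heights k e) (fun x => x) false ++ res.drop (e + 1)).length = n := by
          simp [hvslen]
          omega
        rw [ihd (e + 1) _ (by omega) hlen']
        have htk : (res.take k ++ PySem.List.sorted (segF heights k e) (fun x => x) false ++ res.drop (e + 1)).take (e + 1)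
            = res.take k ++ PySem.List.sorted (segF heights k e) (fun x => x) false := by
          rw [List.take_append]
          have h1 : (res.take k ++ PySem.List.sorted (segF heights k e) (fun x => x) false).length = e + 1 := by
            simp [hvslen]; omega
          rw [List.take_of_length_le (by omega), h1]
          simp
        rw [htk]
        conv_rhs => rw [bSpecF]
        rw [dif_pos hk, ← hedef]
        simp [List.append_assoc]
      · rw [compsSpec, dif_neg hk, bSpecF, dif_neg hk]
        rw [List.foldl_nil, List.take_of_length_le (by omega), List.append_nil]

-- L8: B's scan produces the sorted runs
lemma b_scan (D : Int) (heights : List Int) (n : Nat) :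
    ∀ (fuel i k : Nat) (acc : List Int), n - i ≤ fuel → k ≤ i → i ≤ runEnd n (condF D heights) k → k < n →
    ((PySem.List.pyRange (i : Int) (n : Int) 1).foldl (bStepB (n : Int) D heights) (acc, (k : Int))).1
      = acc ++ bSpecF D heights n k := by
  intro fuel
  induction fuel with
  | zero =>
      intro i k acc hf hki hie hk
      have := runEnd_lt n (condF D heights) k hk
      omega
  | succ fuel ih =>
      intro i k acc hf hki hie hk
      have he := runEnd_lt n (condF D heights) k hk
      have hin : i < n := by omega
      rw [PySem.List.pyRange_one_cons (show (i : Int) < (n : Int) by exact_mod_cast hin)]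
      rw [List.foldl_cons]
      rcases Nat.lt_or_ge i (runEnd n (condF D heights) k) with hlt | hge
      · -- inside the run: no boundary at i
        have hc := runEnd_cond n (condF D heights) k i hki hlt
        have hstep : bStepB (n : Int) D heights (acc, (k : Int)) (i : Int) = (acc, (k : Int)) := by
          unfold bStepB
          rw [if_neg]
          rintro (h1 | h2)
          · have : i + 1 = n := by exact_mod_cast h1
            omega
          · unfold condF hvF at hc
            rw [show ((i : Int) + 1) = ((i + 1 : Nat) : Int) by push_cast; ring] at h2
            simp only [PySem.List.pyGetD_natCast] at h2
            have := of_decide_eq_true hc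
            omega
        rw [hstep, show ((i : Int) + 1) = ((i + 1 : Nat) : Int) by push_cast; ring]
        exact ih (i + 1) k acc (by omega) (by omega) (by omega) hk
      · -- i = runEnd: boundary, close the run
        have hieq : i = runEnd n (condF D heights) k := by omega
        have hstop := runEnd_stop n (condF D heights) k
        have hstep : bStepB (n : Int) D heights (acc, (k : Int)) (i : Int)
            = (acc ++ PySem.List.sorted (segF heights k i) (fun x => x) false, (i : Int) + 1) := by
          unfold bStepB
          rw [if_pos]
          · rw [show ((i : Int) + 1) = ((i + 1 : Nat) : Int) by push_cast; ring]
            rw [PySem.List.slice_natCast]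
            rfl
          · rcases Nat.lt_or_ge (i + 1) n with h1 | h1
            · right
              have hcf : condF D heights i = false := by
                rw [← hieq] at hstop
                rcases Bool.eq_false_or_eq_true (condF D heights i) with h | h
                · exact absurd ⟨h1, h⟩ hstop
                · exact h
              unfold condF hvF at hcf
              rw [show ((i : Int) + 1) = ((i + 1 : Nat) : Int) by push_cast; ring]
              simp only [PySem.List.pyGetD_natCast]
              have := of_decide_eq_false hcf
              omega
            · left
              have : i + 1 = n := by omega
              exact_mod_cast congrArg (Nat.cast : Nat → Int) this
        rw [hstep]
        rw [bSpecF, dif_pos hk, ← hieq]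
        rcases Nat.lt_or_ge (i + 1) n with h1 | h1
        · rw [show ((i : Int) + 1) = ((i + 1 : Nat) : Int) by push_cast; ring]
          rw [ih (i + 1) (i + 1) _ (by omega) le_rfl (le_runEnd n (condF D heights) (i + 1)) h1]
          rw [hieq]
          simp [List.append_assoc]
        · rw [show ((i : Int) + 1) = ((n : Nat) : Int) by exact_mod_cast congrArg (Nat.cast : Nat → Int) (by omega : i + 1 = n)]
          rw [PySem.List.pyRange_one_eq_nil (le_refl ((n : Nat) : Int))]
          rw [List.foldl_nil, bSpecF, dif_neg (by omega)]
          rw [hieq]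
          simp

-- ===== VERDICT (by name: the statement is the Claim_ definition above) =====
theorem solve_spec : Claim_equal_solve := by
  intro N D heights _ hpre
  unfold Spec_solve
  rcases Int.lt_or_le N 0 with hneg | h0
  · -- N < 0: both programs do nothing
    unfold solve solve_alt
    rw [PySem.List.pyRange_one_eq_nil (show N ≤ (0 : Int) by omega)]
    simp [Int.toNat_of_nonpos (le_of_lt hneg)]
  · obtain ⟨n, rfl⟩ := Int.eq_ofNat_of_zero_le h0
    have hn : n ≤ heights.length := by
      have h := hpre; unfold Pre_solve at h; exact_mod_cast h
    unfold solve solve_alt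
    dsimp only
    rw [show ((n : Int)).toNat = n by omega]
    rcases Nat.eq_zero_or_pos n with rfl | hpos
    · simp [PySem.List.pyRange_one_eq_nil]
    · have hcomp := comps_loop D heights n 0 0 [] (le_refl 0)
      simp only [Nat.cast_zero] at hcomp
      rw [replicate_eq_mkVis, hcomp]
      simp only [List.nil_append]
      rw [write_runs D heights n hn 0 (List.replicate n 0) (by simp)]
      rw [List.take_zero, List.nil_append]
      have hb := b_scan D heights n n 0 0 [] (by omega) (le_refl 0) (le_runEnd n (condF D heights) 0) hpos
      simp only [Nat.cast_zero] at hb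
      rw [hb]
      simp
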